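-- pv_equiv track=rewrite | github.com/rawrex/srs.nvim | core/index/tracking.py | is_directory_tracked
-- ===== SOURCE A (Python) =====
-- def is_directory_tracked(directory: str, repeat_dirs: set[str], norepeat_dirs: set[str]) -> bool:
--     tracked = "" in repeat_dirs
--     if "" in norepeat_dirs:
--         tracked = False
--
--     current = ""
--     for part in [part for part in directory.split("/") if part]:
--         current = f"{current}/{part}" if current else part
--         if current in norepeat_dirs:
--             tracked = False
--         if current in repeat_dirs:
--             tracked = True
--     return tracked
-- ===== SOURCE B (Python) =====
-- def is_directory_tracked(directory: str, repeat_dirs: set, norepeat_dirs: set) -> bool: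
--     prefixes = []
--     current = ""
--     for part in directory.split("/"):
--         if part:
--             current = f"{current}/{part}" if current else part
--             prefixes.append(current)
--     for prefix in reversed(prefixes):
--         if prefix in repeat_dirs:
--             return True
--         if prefix in norepeat_dirs:
--             return False
--     return ("" in repeat_dirs) and ("" not in norepeat_dirs)
-- ===== Notes on version B (the rewrite author's own statement) =====
-- stated objective: alternative
-- what changed: Replaces A's full forward scan that keeps overwriting a tracked flag with a deepest-first reverse scan over the cumulative prefix list that early-returns at the most specific matching rule (repeat checked before norepeat), falling back to the root rule when no prefix matches.
import Mathlib
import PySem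

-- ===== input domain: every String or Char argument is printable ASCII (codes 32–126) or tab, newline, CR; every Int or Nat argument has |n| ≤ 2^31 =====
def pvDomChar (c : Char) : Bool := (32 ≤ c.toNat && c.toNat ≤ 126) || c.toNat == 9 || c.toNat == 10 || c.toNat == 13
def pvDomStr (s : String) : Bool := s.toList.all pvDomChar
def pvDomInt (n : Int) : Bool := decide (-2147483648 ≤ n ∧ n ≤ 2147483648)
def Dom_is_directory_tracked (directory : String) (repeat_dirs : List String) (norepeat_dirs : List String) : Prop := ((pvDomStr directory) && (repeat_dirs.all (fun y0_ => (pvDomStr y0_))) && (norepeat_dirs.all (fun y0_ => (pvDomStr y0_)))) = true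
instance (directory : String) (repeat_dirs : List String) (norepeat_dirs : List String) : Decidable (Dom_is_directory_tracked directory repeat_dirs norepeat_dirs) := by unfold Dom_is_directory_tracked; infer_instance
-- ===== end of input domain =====

-- B replaces A's full forward accumulating scan by a deepest-first reverse scan with
-- early exit at the most specific matching rule (objective: alternative decomposition).

-- ===== PORT A =====
def is_directory_tracked (directory : String) (repeat_dirs : List String) (norepeat_dirs : List String) : Bool :=
  -- tracked = "" in repeat_dirs; if "" in norepeat_dirs: tracked = False
  let tracked0 : Bool := if norepeat_dirs.contains "" then false else repeat_dirs.contains ""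
  -- for part in [part for part in directory.split("/") if part]: …
  ((((PySem.Str.split? directory "/").getD []).filter (fun p => p ≠ "")).foldl
    (fun (st : String × Bool) (part : String) =>
      let current := if st.1 = "" then part else st.1 ++ "/" ++ part
      let t1 := if norepeat_dirs.contains current then false else st.2
      let t2 := if repeat_dirs.contains current then true else t1
      (current, t2))
    ("", tracked0)).2

-- ===== PORT B =====
-- build the cumulative prefix list (skipping empty split parts)
def pvPrefixes (cur : String) : List String → List String
  | [] => []
  | p :: rest =>
      if p = "" then pvPrefixes cur rest
      else
        let c := if cur = "" then p else cur ++ "/" ++ p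
        c :: pvPrefixes c rest

-- early-return loop: for prefix in reversed(prefixes): …
def pvScan (repeat_dirs norepeat_dirs : List String) : List String → Option Bool
  | [] => none
  | p :: rest =>
      if repeat_dirs.contains p then some true
      else if norepeat_dirs.contains p then some false
      else pvScan repeat_dirs norepeat_dirs rest

def is_directory_tracked_alt (directory : String) (repeat_dirs : List String) (norepeat_dirs : List String) : Bool :=
  match pvScan repeat_dirs norepeat_dirs (pvPrefixes "" ((PySem.Str.split? directory "/").getD [])).reverse with
  | some b => b
  | none => repeat_dirs.contains "" && !(norepeat_dirs.contains "")

-- ===== PRECONDITION & SPEC =====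
def Spec_is_directory_tracked (directory : String) (repeat_dirs : List String) (norepeat_dirs : List String) (out : Bool) : Prop := out = is_directory_tracked_alt directory repeat_dirs norepeat_dirs
instance (directory : String) (repeat_dirs : List String) (norepeat_dirs : List String) (out : Bool) : Decidable (Spec_is_directory_tracked directory repeat_dirs norepeat_dirs out) := by unfold Spec_is_directory_tracked; infer_instance

-- ===== CLAIM (what is proved, stated in full; the proofs are below) =====
def Claim_equal_is_directory_tracked : Prop := ∀ (directory : String) (repeat_dirs : List String) (norepeat_dirs : List String), Dom_is_directory_tracked directory repeat_dirs norepeat_dirs → Spec_is_directory_tracked directory repeat_dirs norepeat_dirs (is_directory_tracked directory repeat_dirs norepeat_dirs)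

-- ===== LEMMAS AND PROOFS =====

-- scanning a list extended at the back first yields the old result, then checks the new element
theorem pvScan_append (rep nore : List String) (xs : List String) (c : String) :
    pvScan rep nore (xs ++ [c]) =
      match pvScan rep nore xs with
      | some b => some b
      | none =>
          if rep.contains c then some true
          else if nore.contains c then some false
          else none := by
  induction xs with
  | nil => simp only [List.nil_append, pvScan]
  | cons p rest ih =>
      simp only [List.cons_append, pvScan]
      split_ifs <;> first
        | rfl
        | (rw [ih]; cases pvScan rep nore rest <;> simp_all)

-- main invariant: A's accumulating forward fold equals B's reverse scan with fallback t
theorem pv_fold_eq_scan (rep nore : List String) :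
    ∀ (parts : List String) (cur : String) (t : Bool),
      ((parts.filter (fun p => p ≠ "")).foldl
        (fun (st : String × Bool) (part : String) =>
          let current := if st.1 = "" then part else st.1 ++ "/" ++ part
          let t1 := if nore.contains current then false else st.2
          let t2 := if rep.contains current then true else t1
          (current, t2))
        (cur, t)).2
      = match pvScan rep nore (pvPrefixes cur parts).reverse with
        | some b => b
        | none => t := by
  intro parts
  induction parts with
  | nil => intro cur t; simp [pvPrefixes, pvScan]
  | cons p rest ih =>
      intro cur t
      by_cases hp : p = ""
      · simp only [hp, pvPrefixes, List.filter_cons]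
        simpa using ih cur t
      · simp only [pvPrefixes, List.filter_cons, if_neg hp]
        have hfp : (decide ¬p = "") = true := by simp [hp]
        simp only [hfp, if_true, List.foldl_cons, List.reverse_cons]
        rw [ih, pvScan_append]
        cases pvScan rep nore (pvPrefixes (if cur = "" then p else cur ++ "/" ++ p) rest).reverse with
        | some b => rfl
        | none => split_ifs <;> rfl

-- ===== VERDICT (by name: the statement is the Claim_ definition above) =====
theorem is_directory_tracked_spec : Claim_equal_is_directory_tracked := by
  intro directory rep nore _
  unfold Spec_is_directory_tracked is_directory_tracked is_directory_tracked_alt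
  rw [pv_fold_eq_scan]
  cases pvScan rep nore (pvPrefixes "" ((PySem.Str.split? directory "/").getD [])).reverse with
  | some b => rfl
  | none =>
      cases hn : nore.contains "" <;> cases hr : rep.contains "" <;> simp
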